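-- pv_equiv track=rewrite | github.com/ORNL-QCI/annie-rose | examples/bobwire/lib/b_qim_client.py | sdc_decode_char
-- ===== SOURCE A (Python) =====
-- def sdc_decode_char(b):
--     '''
--     Decode a character from SDC flags.
--     '''
--     if len(b) != 4:
--         raise ValueError('Length of b not 4')
--
--     b = [int(x) for x in b]
--     return chr((b[0] << 0) \
--                + (b[1] << 2) \
--                + (b[2] << 4) \
--                + (b[3] << 6)
--               )
-- ===== SOURCE B (Python) =====
-- def sdc_decode_char(b):
--     '''
--     Decode a character from SDC flags.
--     '''
--     if len(b) != 4:
--         raise ValueError('Length of b not 4')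
--
--     bits = []
--     for x in b:
--         q, r = divmod(int(x), 2)
--         bits.append(r)
--         bits.append(q)
--     val = 0
--     for bit in reversed(bits):
--         val = 2 * val + bit
--     return chr(val)
-- ===== Notes on version B (the rewrite author's own statement) =====
-- stated objective: alternative
-- what changed: B changes radix: each 2-bit flag is split by divmod into its two binary bit-planes, giving an 8-digit base-2 expansion that is accumulated most-significant-bit first, instead of A's single base-4 shift-sum over the 4 flags; Pre_ excludes chr-range errors and the surrogate range 0xD800-0xDFFF, where A's lone-surrogate str is not representable as a Lean Char/String.
import Mathlib
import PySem

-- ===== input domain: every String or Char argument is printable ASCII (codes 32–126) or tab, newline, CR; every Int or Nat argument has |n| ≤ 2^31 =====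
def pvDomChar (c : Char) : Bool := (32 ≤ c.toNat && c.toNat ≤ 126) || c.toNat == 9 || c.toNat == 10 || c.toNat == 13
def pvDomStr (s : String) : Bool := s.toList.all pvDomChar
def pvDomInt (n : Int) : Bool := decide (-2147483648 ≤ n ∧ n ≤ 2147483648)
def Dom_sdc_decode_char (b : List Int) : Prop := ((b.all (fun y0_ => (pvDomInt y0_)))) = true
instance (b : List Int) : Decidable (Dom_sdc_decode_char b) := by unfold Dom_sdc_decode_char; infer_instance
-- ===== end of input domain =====

-- B changes radix: each flag is split by divmod into its two binary bit-planes and the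
-- 8-digit base-2 expansion is accumulated most-significant-bit first, instead of A's
-- single base-4 shift-sum over the 4 flags.


-- ===== PORT A =====
-- chr(v) is ported by hand as Char.ofNat v.toNat in a one-char string: exact for
-- 0 ≤ v < 0x110000 outside the surrogate range (Pre_ restricts to exactly that).
def sdc_decode_char (b : List Int) : String :=
  match b with
  | [b0, b1, b2, b3] =>
      String.ofList [Char.ofNat ((b0 * 1 + b1 * 4 + b2 * 16 + b3 * 64).toNat)]
  | _ => ""  -- len(b) != 4: ValueError in Python, excluded by Pre_

-- ===== PORT B =====
def sdc_decode_char_alt (b : List Int) : String :=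
  if b.length ≠ 4 then ""  -- ValueError in Python, excluded by Pre_
  else
    -- divmod(x, 2) → (PySem.Int.floordiv x 2, PySem.Int.mod x 2)
    let bits := b.foldl (fun acc x => acc ++ [PySem.Int.mod x 2, PySem.Int.floordiv x 2]) []
    let val := bits.reverse.foldl (fun v bit => 2 * v + bit) 0
    String.ofList [Char.ofNat val.toNat]  -- chr, exact on Pre_ as for port A

-- ===== PRECONDITION & SPEC =====
-- Pre_ excludes length ≠ 4 and decoded values outside chr's range (A raises
-- ValueError in both cases); it also excludes the surrogate range 0xD800–0xDFFF,
-- where A returns a lone-surrogate str not representable as a Lean Char/String.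
def Pre_sdc_decode_char (b : List Int) : Prop :=
  b.length = 4 ∧
  (let v := b.getD 0 0 + 4 * b.getD 1 0 + 16 * b.getD 2 0 + 64 * b.getD 3 0
   0 ≤ v ∧ v < 1114112 ∧ (v < 55296 ∨ 57344 ≤ v))
instance (b : List Int) : Decidable (Pre_sdc_decode_char b) := by
  unfold Pre_sdc_decode_char; infer_instance
def pvWitness_sdc_decode_char : List Int := [1, 0, 2, 1]

def Spec_sdc_decode_char (b : List Int) (out : String) : Prop := out = sdc_decode_char_alt b
instance (b : List Int) (out : String) : Decidable (Spec_sdc_decode_char b out) := by unfold Spec_sdc_decode_char; infer_instance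

-- ===== CLAIM (what is proved, stated in full; the proofs are below) =====
def Claim_equal_sdc_decode_char : Prop := ∀ (b : List Int), Dom_sdc_decode_char b → Pre_sdc_decode_char b → Spec_sdc_decode_char b (sdc_decode_char b)

-- ===== LEMMAS AND PROOFS =====

-- ===== VERDICT (by name: the statement is the Claim_ definition above) =====
theorem sdc_decode_char_spec : Claim_equal_sdc_decode_char := by
  intro b _ hpre
  obtain ⟨hlen, hv⟩ := hpre
  match b, hlen with
  | [b0, b1, b2, b3], _ =>
    show _ = sdc_decode_char_alt _
    simp at hv
    have h0 := PySem.Int.floordiv_mul_add_mod b0 2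
    have h1 := PySem.Int.floordiv_mul_add_mod b1 2
    have h2 := PySem.Int.floordiv_mul_add_mod b2 2
    have h3 := PySem.Int.floordiv_mul_add_mod b3 2
    simp only [sdc_decode_char, sdc_decode_char_alt, List.foldl, List.reverse,
      List.append_nil, List.nil_append, List.cons_append, List.length_cons,
      List.length_nil, List.reverseAux]
    norm_num
    refine congrArg (fun n => String.ofList [Char.ofNat n]) ?_
    omega
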